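-- pv_equiv track=rewrite | github.com/mrmagicbg/ojs-bg-edu | scripts/sync_structure.py | get_last_block
-- ===== SOURCE A (Python) =====
-- def get_last_block(lines):
--     # return consecutive block of lines starting with '>' from the end
--     out = []
--     i = len(lines)-1
--     while i >= 0 and not lines[i].strip():
--         i -= 1
--     # now collect consecutive '>' lines from i backwards
--     j = i
--     while j >= 0 and lines[j].lstrip().startswith('>'):
--         j -= 1
--     if j < i:
--         return lines[j+1:i+1]
--     return []
-- ===== SOURCE B (Python) =====
-- def get_last_block(lines):
--     # trim trailing blank lines, then forward pass tracking the start
--     # of the last consecutive run of '>' lines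
--     i = len(lines) - 1
--     while i >= 0 and not lines[i].strip():
--         i -= 1
--     start = None
--     for k in range(i + 1):
--         if lines[k].lstrip().startswith('>'):
--             if start is None:
--                 start = k
--         else:
--             start = None
--     return [] if start is None else lines[start:i+1]
-- ===== Notes on version B (the rewrite author's own statement) =====
-- stated objective: alternative
-- what changed: Replaces A's second backward scan (with early exit) by a single forward pass over the trimmed prefix that tracks the start of the last consecutive run of '>' lines.
import Mathlib
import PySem

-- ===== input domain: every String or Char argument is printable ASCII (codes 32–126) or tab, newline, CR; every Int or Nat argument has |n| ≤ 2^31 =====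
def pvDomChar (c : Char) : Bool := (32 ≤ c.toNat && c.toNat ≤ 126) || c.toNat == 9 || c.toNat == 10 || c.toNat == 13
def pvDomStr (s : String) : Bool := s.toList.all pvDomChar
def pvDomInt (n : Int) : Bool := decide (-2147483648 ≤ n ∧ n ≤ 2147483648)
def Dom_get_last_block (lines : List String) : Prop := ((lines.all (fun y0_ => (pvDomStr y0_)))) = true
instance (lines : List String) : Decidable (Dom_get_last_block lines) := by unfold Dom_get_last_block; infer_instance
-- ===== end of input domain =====

-- B replaces A's backward '>'-run scan by a single forward pass tracking the
-- start of the last consecutive '>' run (alternative decomposition, same cost).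

-- ===== PORT A =====
-- while i >= 0 and not lines[i].strip(): i -= 1
def aTrim (lines : List String) (i : Int) : Int :=
  if h : 0 ≤ i ∧ PySem.Str.strip ((PySem.List.pyGet? lines i).getD "") = "" then
    aTrim lines (i - 1)
  else i
termination_by (i + 1).toNat
decreasing_by obtain ⟨h1, -⟩ := h; omega

-- while j >= 0 and lines[j].lstrip().startswith('>'): j -= 1
def aCollect (lines : List String) (j : Int) : Int :=
  if h : 0 ≤ j ∧ PySem.Str.startswith (PySem.Str.lstrip ((PySem.List.pyGet? lines j).getD "")) ">" = true then
    aCollect lines (j - 1)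
  else j
termination_by (j + 1).toNat
decreasing_by obtain ⟨h1, -⟩ := h; omega

def get_last_block (lines : List String) : List String :=
  let i := aTrim lines ((lines.length : Int) - 1)
  let j := aCollect lines i
  if j < i then PySem.List.slice lines (some (j + 1)) (some (i + 1)) else []

-- ===== PORT B =====
-- same backward trim of trailing blank lines as in Source B
def bTrim (lines : List String) (i : Int) : Int :=
  if h : 0 ≤ i ∧ PySem.Str.strip ((PySem.List.pyGet? lines i).getD "") = "" then
    bTrim lines (i - 1)
  else i
termination_by (i + 1).toNat
decreasing_by obtain ⟨h1, -⟩ := h; omega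

def get_last_block_alt (lines : List String) : List String :=
  let i := bTrim lines ((lines.length : Int) - 1)
  let start := (PySem.List.pyRange 0 (i + 1) 1).foldl
    (fun (st : Option Int) k =>
      if PySem.Str.startswith (PySem.Str.lstrip ((PySem.List.pyGet? lines k).getD "")) ">" = true then
        match st with
        | none => some k
        | some s => some s
      else none) none
  match start with
  | none => []
  | some s => PySem.List.slice lines (some s) (some (i + 1))

-- ===== PRECONDITION & SPEC =====
def Spec_get_last_block (lines : List String) (out : List String) : Prop := out = get_last_block_alt lines
instance (lines : List String) (out : List String) : Decidable (Spec_get_last_block lines out) := by unfold Spec_get_last_block; infer_instance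

-- ===== CLAIM (what is proved, stated in full; the proofs are below) =====
def Claim_equal_get_last_block : Prop := ∀ (lines : List String), Dom_get_last_block lines → Spec_get_last_block lines (get_last_block lines)

-- ===== LEMMAS AND PROOFS =====

theorem bTrim_eq_aTrim (lines : List String) (i : Int) : bTrim lines i = aTrim lines i := by
  rw [bTrim.eq_def, aTrim.eq_def]
  by_cases h : 0 ≤ i ∧ PySem.Str.strip ((PySem.List.pyGet? lines i).getD "") = ""
  · rw [dif_pos h, dif_pos h]; exact bTrim_eq_aTrim lines (i - 1)
  · rw [dif_neg h, dif_neg h]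
termination_by (i + 1).toNat
decreasing_by obtain ⟨h1, -⟩ := h; omega

theorem aTrim_ge (lines : List String) (i : Int) (hi : -1 ≤ i) : -1 ≤ aTrim lines i := by
  rw [aTrim.eq_def]
  by_cases h : 0 ≤ i ∧ PySem.Str.strip ((PySem.List.pyGet? lines i).getD "") = ""
  · rw [dif_pos h]; exact aTrim_ge lines (i - 1) (by omega)
  · rw [dif_neg h]; omega
termination_by (i + 1).toNat
decreasing_by obtain ⟨h1, -⟩ := h; omega

theorem aCollect_le (lines : List String) (j : Int) : aCollect lines j ≤ j := by
  rw [aCollect.eq_def]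
  by_cases h : 0 ≤ j ∧ PySem.Str.startswith (PySem.Str.lstrip ((PySem.List.pyGet? lines j).getD "")) ">" = true
  · rw [dif_pos h]; have := aCollect_le lines (j - 1); omega
  · rw [dif_neg h]
termination_by (j + 1).toNat
decreasing_by obtain ⟨h1, -⟩ := h; omega

-- shorthand for the '>'-line test (proof-only)
def Pgt (lines : List String) (k : Int) : Bool :=
  PySem.Str.startswith (PySem.Str.lstrip ((PySem.List.pyGet? lines k).getD "")) ">"

theorem aCollect_stop (lines : List String) (j : Int)
    (h : ¬ (0 ≤ j ∧ Pgt lines j = true)) : aCollect lines j = j := by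
  rw [aCollect.eq_def, dif_neg]
  exact fun h' => h ⟨h'.1, h'.2⟩

theorem aCollect_step (lines : List String) (j : Int)
    (h : 0 ≤ j ∧ Pgt lines j = true) : aCollect lines j = aCollect lines (j - 1) := by
  rw [aCollect.eq_def, dif_pos]
  exact ⟨h.1, h.2⟩

-- the forward fold over range(0, n) computes A's backward collect result
theorem fold_range (lines : List String) (n : Nat) :
    (PySem.List.pyRange 0 (n : Int) 1).foldl
      (fun (st : Option Int) k =>
        if PySem.Str.startswith (PySem.Str.lstrip ((PySem.List.pyGet? lines k).getD "")) ">" = true then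
          match st with
          | none => some k
          | some s => some s
        else none) none
    = if 0 < n ∧ Pgt lines ((n : Int) - 1) = true
      then some (aCollect lines ((n : Int) - 1) + 1) else none := by
  have hstep : (fun (st : Option Int) k =>
      if PySem.Str.startswith (PySem.Str.lstrip ((PySem.List.pyGet? lines k).getD "")) ">" = true then
        match st with
        | none => some k
        | some s => some s
      else none)
      = fun (st : Option Int) k => if Pgt lines k = true then some (st.getD k) else none := by
    funext st k
    simp only [Pgt]
    cases st <;> split <;> rfl
  rw [hstep]
  induction n with
  | zero => simp [PySem.List.pyRange_one_eq_nil]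
  | succ m ih =>
      have hm0 : (0 : Int) ≤ (m : Int) := Int.natCast_nonneg m
      have hsplit : PySem.List.pyRange 0 ((m + 1 : Nat) : Int) 1
          = PySem.List.pyRange 0 (m : Int) 1 ++ [(m : Int)] := by
        have hc : ((m + 1 : Nat) : Int) = (m : Int) + 1 := by push_cast; ring
        rw [hc, PySem.List.pyRange_one_succ_right hm0]
      have hcast : ((m + 1 : Nat) : Int) - 1 = (m : Int) := by push_cast; ring
      rw [hsplit, List.foldl_append, ih, hcast, List.foldl_cons, List.foldl_nil]
      by_cases hPm : Pgt lines (m : Int) = true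
      · have hCm : aCollect lines (m : Int) = aCollect lines ((m : Int) - 1) :=
          aCollect_step lines _ ⟨hm0, hPm⟩
        rw [if_pos hPm, if_pos (⟨Nat.succ_pos m, hPm⟩ : 0 < m + 1 ∧ Pgt lines (m : Int) = true)]
        by_cases hprev : 0 < m ∧ Pgt lines ((m : Int) - 1) = true
        · rw [if_pos hprev]
          simp only [Option.getD_some, Option.some.injEq]
          omega
        · rw [if_neg hprev]
          have hstop : aCollect lines ((m : Int) - 1) = (m : Int) - 1 := by
            apply aCollect_stop
            rintro ⟨hle, hP⟩
            rcases Nat.eq_zero_or_pos m with h0 | hpos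
            · subst h0; simp at hle
            · exact hprev ⟨hpos, hP⟩
          rw [hCm, hstop]
          simp only [Option.getD_none, Option.some.injEq]
          omega
      · rw [Bool.not_eq_true] at hPm
        rw [if_neg (by simp [hPm]), if_neg (fun hc => by rw [hPm] at hc; exact Bool.false_ne_true hc.2)]

-- core equality, with the trimmed index i abstracted
theorem core (lines : List String) (i : Int) (hge : -1 ≤ i) :
    (if aCollect lines i < i then
        PySem.List.slice lines (some (aCollect lines i + 1)) (some (i + 1)) else [])
    = (match (PySem.List.pyRange 0 (i + 1) 1).foldl
        (fun (st : Option Int) k =>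
          if PySem.Str.startswith (PySem.Str.lstrip ((PySem.List.pyGet? lines k).getD "")) ">" = true then
            match st with
            | none => some k
            | some s => some s
          else none) none with
      | none => []
      | some s => PySem.List.slice lines (some s) (some (i + 1))) := by
  obtain ⟨n, hncast⟩ : ∃ n : Nat, (n : Int) = i + 1 := ⟨(i + 1).toNat, by omega⟩
  rw [← hncast, fold_range lines n]
  have hn1 : (n : Int) - 1 = i := by omega
  rw [hn1]
  by_cases hcond : 0 < n ∧ Pgt lines i = true
  · have hi0 : 0 ≤ i := by omega
    have hjlt : aCollect lines i < i := by
      have h1 := aCollect_step lines i ⟨hi0, hcond.2⟩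
      have h2 := aCollect_le lines (i - 1)
      omega
    rw [if_pos hcond, if_pos hjlt, hncast]
  · have hj : aCollect lines i = i := by
      apply aCollect_stop
      rintro ⟨hle, hP⟩
      exact hcond ⟨by omega, hP⟩
    rw [if_neg hcond, hj, if_neg (lt_irrefl i)]

-- ===== VERDICT (by name: the statement is the Claim_ definition above) =====
theorem get_last_block_spec : Claim_equal_get_last_block := by
  intro lines _
  show get_last_block lines = get_last_block_alt lines
  have halt : get_last_block_alt lines
      = (match (PySem.List.pyRange 0 (aTrim lines ((lines.length : Int) - 1) + 1) 1).foldl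
          (fun (st : Option Int) k =>
            if PySem.Str.startswith (PySem.Str.lstrip ((PySem.List.pyGet? lines k).getD "")) ">" = true then
              match st with
              | none => some k
              | some s => some s
            else none) none with
        | none => []
        | some s => PySem.List.slice lines (some s) (some (aTrim lines ((lines.length : Int) - 1) + 1))) := by
    unfold get_last_block_alt
    rw [bTrim_eq_aTrim]
  rw [halt]
  exact core lines (aTrim lines ((lines.length : Int) - 1)) (aTrim_ge lines _ (by omega))
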